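-- pv_equiv track=rewrite | github.com/medu1122/learn | pert_python/bai12.py | doanconDuongmang
-- ===== SOURCE A (Python) =====
-- def doanconDuongmang(arr):
--     n1=0
--     result=0
--     for i in range(len(arr)):
--         n2=0
--         if arr[i]>0:
--             for j in range(i,len(arr)):
--                 n2+=1
--                 if arr[j]<0:
--                     break
--         if n2>n1 :
--             n1=n2
--             result=i
--     return result
-- ===== SOURCE B (Python) =====
-- def doanconDuongmang(arr):
--     # single backward pass: track index of next negative and running best (>= keeps the smallest index)
--     n = len(arr)
--     nn = None
--     best = 0
--     result = 0
--     for i in range(n - 1, -1, -1):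
--         if arr[i] < 0:
--             nn = i
--         if arr[i] > 0:
--             L = (nn - i + 1) if nn is not None else n - i
--         else:
--             L = 0
--         if L >= best:
--             best = L
--             result = i
--     return result
-- ===== Notes on version B (the rewrite author's own statement) =====
-- stated objective: alternative
-- what changed: Replaced the per-index forward rescan to the first negative by one backward pass that maintains the index of the next negative element and a running maximum (>= so ties keep the smallest index).
import Mathlib
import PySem

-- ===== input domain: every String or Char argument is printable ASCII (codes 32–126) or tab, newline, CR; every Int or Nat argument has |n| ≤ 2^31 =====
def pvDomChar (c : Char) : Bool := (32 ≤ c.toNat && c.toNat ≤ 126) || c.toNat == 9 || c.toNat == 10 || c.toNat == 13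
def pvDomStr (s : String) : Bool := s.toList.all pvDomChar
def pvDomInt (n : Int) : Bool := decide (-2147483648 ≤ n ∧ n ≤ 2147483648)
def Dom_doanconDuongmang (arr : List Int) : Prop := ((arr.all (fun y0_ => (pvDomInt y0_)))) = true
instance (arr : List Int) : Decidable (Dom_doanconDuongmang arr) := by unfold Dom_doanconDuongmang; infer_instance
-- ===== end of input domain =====

-- B replaces A's per-index forward rescan by a single backward pass tracking the next-negative
-- index and a running maximum; objective: alternative (one pass instead of nested rescans).

-- ===== PORT A =====
-- inner loop: for j in range(i, len(arr)): n2 += 1; if arr[j] < 0: break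
def pvInnerA (arr : List Int) : List Int → Int → Int
  | [], n2 => n2
  | j :: js, n2 =>
    if PySem.List.pyGetD arr j 0 < 0 then n2 + 1 else pvInnerA arr js (n2 + 1)

-- one iteration of A's outer loop; state = (n1, result)
def pvStepA (arr : List Int) (st : Int × Int) (i : Int) : Int × Int :=
  let n2 : Int :=
    if PySem.List.pyGetD arr i 0 > 0 then
      pvInnerA arr (PySem.List.pyRange i (arr.length : Int) 1) 0
    else 0
  if n2 > st.1 then (n2, i) else st

def doanconDuongmang (arr : List Int) : Int :=
  ((PySem.List.pyRange 0 (arr.length : Int) 1).foldl (pvStepA arr) (0, 0)).2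

-- ===== PORT B =====
-- one iteration of B's backward loop; state = (nn, best, result)
def pvStepB (arr : List Int) (st : Option Int × Int × Int) (i : Int) : Option Int × Int × Int :=
  let nn := if PySem.List.pyGetD arr i 0 < 0 then some i else st.1
  let L : Int :=
    if PySem.List.pyGetD arr i 0 > 0 then
      match nn with
      | some m => m - i + 1
      | none => (arr.length : Int) - i
    else 0
  if L ≥ st.2.1 then (nn, L, i) else (nn, st.2.1, st.2.2)

def doanconDuongmang_alt (arr : List Int) : Int :=
  ((PySem.List.pyRange ((arr.length : Int) - 1) (-1) (-1)).foldl (pvStepB arr) (none, 0, 0)).2.2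

-- ===== PRECONDITION & SPEC =====
def Spec_doanconDuongmang (arr : List Int) (out : Int) : Prop := out = doanconDuongmang_alt arr
instance (arr : List Int) (out : Int) : Decidable (Spec_doanconDuongmang arr out) := by unfold Spec_doanconDuongmang; infer_instance

-- ===== CLAIM (what is proved, stated in full; the proofs are below) =====
def Claim_equal_doanconDuongmang : Prop := ∀ (arr : List Int), Dom_doanconDuongmang arr → Spec_doanconDuongmang arr (doanconDuongmang arr)

-- ===== LEMMAS AND PROOFS =====

-- length (inclusive) of the prefix up to and including the first negative element
def pvCnt : List Int → Int
  | [] => 0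
  | a :: t => 1 + (if a < 0 then 0 else pvCnt t)

-- the run length A computes at each index
def pvLens : List Int → List Int
  | [] => []
  | a :: t => (if a > 0 then pvCnt (a :: t) else 0) :: pvLens t

-- absolute index of the first negative element, indices starting at i
def pvFnn : List Int → Int → Option Int
  | [], _ => none
  | a :: t, i => if a < 0 then some i else pvFnn t (i + 1)

-- reference for A's outer loop over the lengths list
def pvFwd : List Int → Int × Int → Int → Int × Int
  | [], st, _ => st
  | L :: ls, st, i => pvFwd ls (if L > st.1 then (L, i) else st) (i + 1)

-- reference for B's backward loop (step at index i applied after processing the suffix)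
def pvBwd (n : Int) : List Int → Int → Option Int × Int × Int
  | [], _ => (none, 0, 0)
  | a :: t, i =>
    let st := pvBwd n t (i + 1)
    let nn := if a < 0 then some i else st.1
    let L : Int :=
      if a > 0 then
        match nn with
        | some m => m - i + 1
        | none => n - i
      else 0
    if L ≥ st.2.1 then (nn, L, i) else (nn, st.2.1, st.2.2)

-- best/result components of the backward loop, on the lengths list
def pvBwdL : List Int → Int → Int × Int
  | [], _ => (0, 0)
  | L :: ls, i =>
    let st := pvBwdL ls (i + 1)
    if L ≥ st.1 then (L, i) else st

def pvMax : List Int → Int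
  | [] => 0
  | a :: t => max a (pvMax t)

def pvFidx (v : Int) : List Int → Int
  | [] => 0
  | a :: t => if a = v then 0 else pvFidx v t + 1

theorem pvCnt_nonneg (l : List Int) : 0 ≤ pvCnt l := by
  induction l with
  | nil => simp [pvCnt]
  | cons a t ih => simp only [pvCnt]; split <;> omega

theorem pvLens_nonneg (l : List Int) : ∀ x ∈ pvLens l, 0 ≤ x := by
  induction l with
  | nil => simp [pvLens]
  | cons a t ih =>
    intro x hx
    simp only [pvLens, List.mem_cons] at hx
    rcases hx with h | h
    · subst h
      split
      · exact pvCnt_nonneg _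
      · exact le_refl 0
    · exact ih x h

theorem pvMax_nonneg (l : List Int) : 0 ≤ pvMax l := by
  induction l with
  | nil => simp [pvMax]
  | cons a t ih => simp only [pvMax]; omega

theorem le_pvMax (l : List Int) : ∀ x ∈ l, x ≤ pvMax l := by
  induction l with
  | nil => simp
  | cons a t ih =>
    intro x hx
    rcases List.mem_cons.mp hx with h | h
    · subst h; simp [pvMax]
    · simp only [pvMax]; exact le_max_of_le_right (ih x h)

-- pvCnt in terms of the first-negative index
theorem pvCnt_fnn (l : List Int) (i : Int) :
    pvCnt l = (match pvFnn l i with | some m => m - i + 1 | none => (l.length : Int)) := by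
  induction l generalizing i with
  | nil => simp [pvCnt, pvFnn]
  | cons a t ih =>
    simp only [pvCnt, pvFnn]
    by_cases h : a < 0
    · simp [h]
    · simp only [h, if_false]
      rw [ih (i + 1)]
      cases hf : pvFnn t (i + 1) <;> simp [List.length_cons] <;> ring

-- characterization of the forward loop
theorem pvFwd_char (ls : List Int) (b r i : Int) (hb : 0 ≤ b) :
    pvFwd ls (b, r) i =
      if b < pvMax ls then (pvMax ls, i + pvFidx (pvMax ls) ls) else (b, r) := by
  induction ls generalizing b r i with
  | nil =>
    simp only [pvFwd, pvMax]
    rw [if_neg (by omega)]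
  | cons L ls ih =>
    simp only [pvFwd, pvMax, pvFidx]
    by_cases hL : L > b
    · rw [if_pos hL, ih L i (i + 1) (by omega)]
      by_cases hM : L < pvMax ls
      · have hmax : max L (pvMax ls) = pvMax ls := by omega
        rw [hmax, if_pos hM, if_pos (by omega), if_neg (by omega)]
        simp only [Prod.mk.injEq]
        refine ⟨trivial, ?_⟩
        ring
      · have hmax : max L (pvMax ls) = L := by omega
        rw [if_neg hM, hmax, if_pos (by omega), if_pos rfl]
        simp only [Prod.mk.injEq]
        refine ⟨trivial, ?_⟩
        ring
    · rw [if_neg hL, ih b r (i + 1) hb]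
      by_cases hM : b < pvMax ls
      · have hmax : max L (pvMax ls) = pvMax ls := by omega
        rw [if_pos hM, hmax, if_pos (by omega), if_neg (by omega)]
        simp only [Prod.mk.injEq]
        refine ⟨trivial, ?_⟩
        ring
      · have hmax : ¬ b < max L (pvMax ls) := by omega
        rw [if_neg hM, if_neg hmax]

-- characterization of the backward loop on the lengths list
theorem pvBwdL_char (ls : List Int) (i : Int) (h0 : ∀ x ∈ ls, 0 ≤ x) :
    pvBwdL ls i =
      (pvMax ls, if ls = [] then 0 else i + pvFidx (pvMax ls) ls) := by
  induction ls generalizing i with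
  | nil => simp [pvBwdL, pvMax]
  | cons L ls ih =>
    have hL0 : 0 ≤ L := h0 L (List.mem_cons_self)
    have hM0 : 0 ≤ pvMax ls := pvMax_nonneg ls
    simp only [pvBwdL, ih (i + 1) (fun x hx => h0 x (List.mem_cons_of_mem _ hx)), pvMax, pvFidx,
      List.cons_ne_nil, if_false]
    by_cases hge : L ≥ pvMax ls
    · have hmax : max L (pvMax ls) = L := by omega
      rw [if_pos hge, hmax, if_pos rfl]
      simp only [Prod.mk.injEq]
      refine ⟨trivial, ?_⟩
      ring
    · have hmax : max L (pvMax ls) = pvMax ls := by omega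
      by_cases hnil : ls = []
      · exfalso
        subst hnil
        simp only [pvMax] at hge
        omega
      · rw [if_neg hge, if_neg hnil, hmax, if_neg (by omega)]
        simp only [Prod.mk.injEq]
        refine ⟨trivial, ?_⟩
        ring

-- head of pvLens: pyGetD at a valid index is the head of the corresponding drop
theorem pyGetD_drop (arr : List Int) (i : Int) (a : Int) (t : List Int)
    (hi : 0 ≤ i) (hd : arr.drop i.toNat = a :: t) :
    PySem.List.pyGetD arr i 0 = a := by
  have hlt : i.toNat < arr.length := by
    by_contra h
    rw [List.drop_eq_nil_of_le (by omega)] at hd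
    exact List.cons_ne_nil a t hd.symm
  rw [PySem.List.pyGetD_eq_getElem arr 0 hi (by omega)]
  have h1 : (List.drop i.toNat arr)[0]? = some a := by rw [hd]; rfl
  rw [List.getElem?_drop] at h1
  have h2 : arr[i.toNat]? = some a := by simpa using h1
  simp [List.getElem?_eq_getElem hlt] at h2
  exact h2

theorem drop_succ_of_drop (arr : List Int) (i : Int) (a : Int) (t : List Int)
    (hi : 0 ≤ i) (hd : arr.drop i.toNat = a :: t) :
    arr.drop (i + 1).toNat = t := by
  have : (i + 1).toNat = i.toNat + 1 := by omega
  rw [this, ← List.drop_drop, hd]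
  simp

theorem len_of_drop (arr : List Int) (i : Int) (l : List Int)
    (hi : 0 ≤ i) (hd : arr.drop i.toNat = l) :
    (arr.length : Int) = i + l.length ∨ l = [] := by
  by_cases h : i.toNat ≤ arr.length
  · left
    have := List.length_drop (l := arr) (i := i.toNat)
    rw [hd] at this
    omega
  · right
    rw [← hd, List.drop_eq_nil_of_le (by omega)]

-- A's inner loop computes pvCnt of the corresponding suffix
theorem pvInnerA_cnt (arr : List Int) (l : List Int) (i n2 : Int)
    (hi : 0 ≤ i) (hd : arr.drop i.toNat = l) :
    pvInnerA arr (PySem.List.pyRange i (arr.length : Int) 1) n2 = n2 + pvCnt l := by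
  induction l generalizing i n2 with
  | nil =>
    have hge : (arr.length : Int) ≤ i := by
      by_contra h
      have : i.toNat < arr.length := by omega
      have := List.drop_eq_nil_iff (l := arr) (i := i.toNat) |>.mp hd
      omega
    rw [PySem.List.pyRange_one_eq_nil hge]
    simp [pvInnerA, pvCnt]
  | cons a t ih =>
    have hlt : i < (arr.length : Int) := by
      by_contra h
      rw [List.drop_eq_nil_of_le (by omega)] at hd
      exact List.cons_ne_nil a t hd.symm
    rw [PySem.List.pyRange_one_cons hlt]
    simp only [pvInnerA, pyGetD_drop arr i a t hi hd]
    by_cases hneg : a < 0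
    · rw [if_pos hneg]
      simp [pvCnt, hneg]
    · rw [if_neg hneg]
      rw [ih (i + 1) (n2 + 1) (by omega) (drop_succ_of_drop arr i a t hi hd)]
      simp [pvCnt, hneg]; ring

-- A's outer loop is pvFwd on the lengths list
theorem foldlA_fwd (arr : List Int) (l : List Int) (i : Int) (st : Int × Int)
    (hi : 0 ≤ i) (hd : arr.drop i.toNat = l) :
    (PySem.List.pyRange i (arr.length : Int) 1).foldl (pvStepA arr) st = pvFwd (pvLens l) st i := by
  induction l generalizing i st with
  | nil =>
    have hge : (arr.length : Int) ≤ i := by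
      by_contra h
      have : i.toNat < arr.length := by omega
      have := List.drop_eq_nil_iff (l := arr) (i := i.toNat) |>.mp hd
      omega
    rw [PySem.List.pyRange_one_eq_nil hge]
    simp [pvLens, pvFwd]
  | cons a t ih =>
    have hlt : i < (arr.length : Int) := by
      by_contra h
      rw [List.drop_eq_nil_of_le (by omega)] at hd
      exact List.cons_ne_nil a t hd.symm
    rw [PySem.List.pyRange_one_cons hlt]
    rw [List.foldl_cons, ih (i + 1) _ (by omega) (drop_succ_of_drop arr i a t hi hd)]
    simp only [pvLens, pvFwd]
    congr 1
    simp only [pvStepA, pyGetD_drop arr i a t hi hd]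
    by_cases hpos : a > 0
    · rw [if_pos hpos, if_pos hpos, pvInnerA_cnt arr (a :: t) i 0 hi hd]
      simp
    · rw [if_neg hpos, if_neg hpos]

-- B's loop is pvBwd
theorem foldrB_bwd (arr : List Int) (l : List Int) (i : Int)
    (hi : 0 ≤ i) (hd : arr.drop i.toNat = l) :
    (PySem.List.pyRange i (arr.length : Int) 1).foldr (fun j st => pvStepB arr st j) (none, 0, 0)
      = pvBwd (arr.length : Int) l i := by
  induction l generalizing i with
  | nil =>
    have hge : (arr.length : Int) ≤ i := by
      by_contra h
      have : i.toNat < arr.length := by omega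
      have := List.drop_eq_nil_iff (l := arr) (i := i.toNat) |>.mp hd
      omega
    rw [PySem.List.pyRange_one_eq_nil hge]
    simp [pvBwd]
  | cons a t ih =>
    have hlt : i < (arr.length : Int) := by
      by_contra h
      rw [List.drop_eq_nil_of_le (by omega)] at hd
      exact List.cons_ne_nil a t hd.symm
    rw [PySem.List.pyRange_one_cons hlt]
    rw [List.foldr_cons, ih (i + 1) (by omega) (drop_succ_of_drop arr i a t hi hd)]
    simp only [pvStepB, pvBwd, pyGetD_drop arr i a t hi hd]

-- the best/result part of pvBwd is pvBwdL on the lengths, and its nn part is pvFnn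
theorem pvBwd_split (arr : List Int) (l : List Int) (i : Int)
    (hi : 0 ≤ i) (hd : arr.drop i.toNat = l) :
    pvBwd (arr.length : Int) l i = (pvFnn l i, pvBwdL (pvLens l) i) := by
  induction l generalizing i with
  | nil => simp [pvBwd, pvFnn, pvLens, pvBwdL]
  | cons a t ih =>
    have hlen : (arr.length : Int) = i + (a :: t).length := by
      rcases len_of_drop arr i (a :: t) hi hd with h | h
      · exact h
      · exact absurd h (List.cons_ne_nil a t)
    simp only [pvBwd, pvFnn, pvLens, pvBwdL,
      ih (i + 1) (by omega) (drop_succ_of_drop arr i a t hi hd)]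
    by_cases hneg : a < 0
    · have hpos : ¬ a > 0 := by omega
      simp only [if_pos hneg, if_neg hpos]
      split <;> rfl
    · simp only [if_neg hneg]
      by_cases hpos : a > 0
      · have hLeq : (match pvFnn t (i + 1) with
            | some m => m - i + 1
            | none => (arr.length : Int) - i) = pvCnt (a :: t) := by
          rw [pvCnt_fnn (a :: t) i]
          simp only [pvFnn, if_neg hneg]
          cases hf : pvFnn t (i + 1) with
          | none =>
            simp only
            rw [hlen]
            ring
          | some m => simp
        simp only [if_pos hpos]
        rw [hLeq]
        split <;> rfl
      · simp only [if_neg hpos]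
        split <;> rfl

-- main equivalence on the reference functions
theorem refs_equal (ls : List Int) (h0 : ∀ x ∈ ls, 0 ≤ x) :
    (pvFwd ls (0, 0) 0).2 = (pvBwdL ls 0).2 := by
  rw [pvFwd_char ls 0 0 0 (le_refl 0), pvBwdL_char ls 0 h0]
  by_cases hnil : ls = []
  · subst hnil
    simp [pvMax]
  · by_cases hM : 0 < pvMax ls
    · simp only [if_pos hM, if_neg hnil]
    · have hMz : pvMax ls = 0 := le_antisymm (by omega) (pvMax_nonneg ls)
      cases ls with
      | nil => exact absurd rfl hnil
      | cons a t =>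
        have ha0 : 0 ≤ a := h0 a (List.mem_cons_self)
        have hale : a ≤ pvMax (a :: t) := le_pvMax _ a (List.mem_cons_self)
        have ha : a = 0 := by omega
        have hfx : pvFidx (pvMax (a :: t)) (a :: t) = 0 := by
          rw [hMz]
          simp only [pvFidx]
          rw [if_pos ha]
        simp only [if_neg hM, if_neg hnil, hfx]
        ring

-- ===== VERDICT (by name: the statement is the Claim_ definition above) =====
theorem doanconDuongmang_spec : Claim_equal_doanconDuongmang := by
  intro arr _
  unfold Spec_doanconDuongmang doanconDuongmang doanconDuongmang_alt
  have hA := foldlA_fwd arr arr 0 (0, 0) (le_refl 0) (by simp)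
  have hrev : PySem.List.pyRange ((arr.length : Int) - 1) (-1) (-1)
      = (PySem.List.pyRange 0 (arr.length : Int) 1).reverse := by
    rw [PySem.List.pyRange_neg_one_eq_reverse]
    norm_num
  rw [hA, hrev, List.foldl_reverse]
  rw [foldrB_bwd arr arr 0 (le_refl 0) (by simp)]
  rw [pvBwd_split arr arr 0 (le_refl 0) (by simp)]
  exact refs_equal (pvLens arr) (pvLens_nonneg arr)
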